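-- pv_equiv track=rewrite | github.com/Saqlain143/Advent-of-Code | 2025/Day 10/1.py | solve_by_bfs
-- ===== SOURCE A (Python) =====
-- from collections import deque
--
-- def solve_by_bfs(target, button_masks, n_lights):
--     """
--     BFS over light configurations. State = bitmask of current lights.
--     Start from all-off (0), each edge = press one button (toggle its mask).
--     First time we reach target state gives minimal number of presses.
--     """
--     if target == 0:
--         return 0
--
--     max_state = 1 << n_lights
--     dist = [-1] * max_state
--     q = deque([0])
--     dist[0] = 0
--
--     while q:
--         state = q.popleft()
--         d = dist[state]
--
--         for bm in button_masks:
--             ns = state ^ bm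
--             if dist[ns] == -1:
--                 dist[ns] = d + 1
--                 if ns == target:
--                     return d + 1
--                 q.append(ns)
--
--     # If here, target is unreachable (shouldn't happen for valid puzzles).
--     return None
-- ===== SOURCE B (Python) =====
-- def _expand(front, masks, dist_self, d_self, dist_other):
--     """Expand one full BFS level of one direction; on meeting the opposite
--     search, return its recorded distance for the meeting state."""
--     new = []
--     for s in front:
--         for bm in masks:
--             ns = s ^ bm
--             if ns not in dist_self:
--                 j = dist_other.get(ns)
--                 if j is not None:
--                     return new, j
--                 dist_self[ns] = d_self + 1
--                 new.append(ns)
--     return new, None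
--
--
-- def solve_by_bfs(target, button_masks, n_lights):
--     """
--     Bidirectional BFS: grow one ball of states around 0 and one around target,
--     always expanding the smaller frontier; the first meeting of the two balls
--     gives the minimal number of presses.
--     """
--     if target == 0:
--         return 0
--     distF = {0: 0}
--     distB = {target: 0}
--     frontF = [0]
--     frontB = [target]
--     dF = 0
--     dB = 0
--     while frontF and frontB:
--         if len(frontF) <= len(frontB):
--             frontF, j = _expand(frontF, button_masks, distF, dF, distB)
--             if j is not None:
--                 return dF + 1 + j
--             dF += 1
--         else:
--             frontB, j = _expand(frontB, button_masks, distB, dB, distF)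
--             if j is not None:
--                 return j + dB + 1
--             dB += 1
--     return None
-- ===== Notes on version B (the rewrite author's own statement) =====
-- stated objective: alternative
-- what changed: A runs a single forward BFS from 0 over a preallocated 2**n_lights distance array with a FIFO deque; B runs a bidirectional BFS that grows two distance dictionaries, one ball around 0 and one around target, always expanding the smaller frontier, and returns the combined distance at the first meeting state.
-- outside the precondition, e.g. on solve_by_bfs(-2, [-2], 1): A returns None, B returns 1
import Mathlib
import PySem

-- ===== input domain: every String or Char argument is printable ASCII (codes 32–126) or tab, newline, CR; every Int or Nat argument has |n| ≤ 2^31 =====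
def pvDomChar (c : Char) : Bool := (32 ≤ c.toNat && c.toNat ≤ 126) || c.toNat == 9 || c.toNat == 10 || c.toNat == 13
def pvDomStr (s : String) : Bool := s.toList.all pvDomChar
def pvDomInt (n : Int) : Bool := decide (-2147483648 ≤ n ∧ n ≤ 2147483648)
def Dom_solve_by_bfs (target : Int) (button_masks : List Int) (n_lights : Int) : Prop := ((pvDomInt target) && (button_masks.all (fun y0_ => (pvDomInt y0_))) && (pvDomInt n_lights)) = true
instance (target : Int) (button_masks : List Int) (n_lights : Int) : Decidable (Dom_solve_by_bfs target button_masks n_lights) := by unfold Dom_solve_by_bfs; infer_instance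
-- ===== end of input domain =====

-- B replaces A's single forward BFS over a preallocated 2^n_lights distance array by a
-- bidirectional BFS: two distance dictionaries grown from 0 and from target, always
-- expanding the smaller frontier, returning the combined distance at the first meeting.

-- ===== PORT A =====
-- inner 'for bm in button_masks' loop of A: returns (dist, items appended to q, early-return value).
-- 'dist[ns]' is PySem.List.pyGet?; where it is none Python raises IndexError (excluded by Pre_).
def bfsAInner (target dA st : Int) : List Int → List Int → List Int → (List Int × List Int × Option Int)
  | [], dist, acc => (dist, acc, none)
  | bm :: bms, dist, acc =>
    let ns := PySem.Int.bxor st bm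
    if PySem.List.pyGet? dist ns = some (-1) then
      let dist' := PySem.List.pySetD dist ns (dA + 1)
      if ns = target then (dist', acc, some (dA + 1))
      else bfsAInner target dA st bms dist' (acc ++ [ns])
    else bfsAInner target dA st bms dist acc

-- 'while q' loop of A; the fuel only totalizes the recursion (its exhaustion is unreachable under Pre_).
def bfsALoop (target : Int) (masks : List Int) : Nat → List Int → List Int → Option Int
  | 0, _, _ => none
  | _ + 1, _, [] => none
  | fuel + 1, dist, st :: rest =>
    let dA := (PySem.List.pyGet? dist st).getD (-1)
    match bfsAInner target dA st masks dist [] with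
    | (_, _, some r) => some r
    | (dist', acc, none) => bfsALoop target masks fuel dist' (rest ++ acc)

def solve_by_bfs (target : Int) (button_masks : List Int) (n_lights : Int) : Option Int :=
  if target = 0 then some 0
  else
    -- max_state = 1 << n_lights (exact for 0 ≤ n_lights; Python raises ValueError for n_lights < 0, excluded by Pre_)
    let max_state : Nat := 2 ^ n_lights.toNat
    let dist : List Int := (List.replicate max_state (-1)).set 0 0
    bfsALoop target button_masks (max_state + 2) dist [0]

-- ===== PORT B =====
-- '_expand' of B, inner 'for bm in button_masks' loop: state (dist_self, new);
-- returns the opposite map's distance j at the first meeting state.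
def bidiInner (other : PySem.Dict Int Int) (dSelf s : Int) :
    List Int → PySem.Dict Int Int → List Int → (PySem.Dict Int Int × List Int × Option Int)
  | [], self, acc => (self, acc, none)
  | bm :: bms, self, acc =>
    let ns := PySem.Int.bxor s bm
    match self.get? ns with
    | some _ => bidiInner other dSelf s bms self acc
    | none =>
      match other.get? ns with
      | some j => (self, acc, some j)
      | none => bidiInner other dSelf s bms (self.insert ns (dSelf + 1)) (acc ++ [ns])

-- '_expand' of B, outer 'for s in front' loop.
def bidiExpand (other : PySem.Dict Int Int) (dSelf : Int) (masks : List Int) :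
    List Int → PySem.Dict Int Int → List Int → (PySem.Dict Int Int × List Int × Option Int)
  | [], self, acc => (self, acc, none)
  | s :: ss, self, acc =>
    match bidiInner other dSelf s masks self acc with
    | (self', acc', some j) => (self', acc', some j)
    | (self', acc', none) => bidiExpand other dSelf masks ss self' acc'

-- 'while frontF and frontB' loop of B; the fuel only totalizes the recursion
-- (its exhaustion is unreachable under Pre_).
def bidiLoop (masks : List Int) : Nat → PySem.Dict Int Int → PySem.Dict Int Int →
    List Int → List Int → Int → Int → Option Int
  | 0, _, _, _, _, _, _ => none
  | fuel + 1, distF, distB, frontF, frontB, dF, dB =>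
    if frontF = [] ∨ frontB = [] then none
    else if frontF.length ≤ frontB.length then
      match bidiExpand distB dF masks frontF distF [] with
      | (_, _, some j) => some (dF + 1 + j)
      | (distF', newF, none) => bidiLoop masks fuel distF' distB newF frontB (dF + 1) dB
    else
      match bidiExpand distF dB masks frontB distB [] with
      | (_, _, some j) => some (j + dB + 1)
      | (distB', newB, none) => bidiLoop masks fuel distF distB' frontF newB dF (dB + 1)

def solve_by_bfs_alt (target : Int) (button_masks : List Int) (n_lights : Int) : Option Int :=
  if target = 0 then some 0
  else bidiLoop button_masks (2 * 2 ^ n_lights.toNat + 4)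
    (PySem.Dict.empty.insert 0 0) (PySem.Dict.empty.insert target 0) [0] [target] 0 0

-- ===== PRECONDITION & SPEC =====
-- Unless target = 0 (where A returns 0 before touching anything), Pre_ excludes: n_lights < 0 (A raises
-- ValueError at 1 << n_lights), masks outside [-2^n_lights, 2^n_lights) (A raises IndexError on dist[ns]),
-- and negative masks, where A's negative list indices silently wrap around the dist table (states counted
-- modulo 2^n_lights) — an accident of the array encoding that B does not reproduce.
def Pre_solve_by_bfs (target : Int) (button_masks : List Int) (n_lights : Int) : Prop :=
  target = 0 ∨ (0 ≤ n_lights ∧ ∀ m ∈ button_masks, 0 ≤ m ∧ m < (2 ^ n_lights.toNat : Nat))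
instance (target : Int) (button_masks : List Int) (n_lights : Int) : Decidable (Pre_solve_by_bfs target button_masks n_lights) := by unfold Pre_solve_by_bfs; infer_instance
def pvWitness_solve_by_bfs : Int × List Int × Int := (3, [1, 2], 2)

def Spec_solve_by_bfs (target : Int) (button_masks : List Int) (n_lights : Int) (out : Option Int) : Prop := out = solve_by_bfs_alt target button_masks n_lights
instance (target : Int) (button_masks : List Int) (n_lights : Int) (out : Option Int) : Decidable (Spec_solve_by_bfs target button_masks n_lights out) := by unfold Spec_solve_by_bfs; infer_instance

-- ===== CLAIM (what is proved, stated in full; the proofs are below) =====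
def Claim_equal_solve_by_bfs : Prop := ∀ (target : Int) (button_masks : List Int) (n_lights : Int), Dom_solve_by_bfs target button_masks n_lights → Pre_solve_by_bfs target button_masks n_lights → Spec_solve_by_bfs target button_masks n_lights (solve_by_bfs target button_masks n_lights)

-- ===== LEMMAS AND PROOFS =====

-- ---------- xor algebra (sign/magnitude view of PySem.Int.bxor) ----------
def imag (a : Int) : Nat := if 0 ≤ a then a.toNat else (-a - 1).toNat
def idec (s : Bool) (m : Nat) : Int := if s then -(m : Int) - 1 else m

lemma bxor_eq_idec (a b : Int) :
    PySem.Int.bxor a b = idec (xor (decide (a < 0)) (decide (b < 0))) (imag a ^^^ imag b) := by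
  unfold PySem.Int.bxor idec imag
  by_cases ha : 0 ≤ a <;> by_cases hb : 0 ≤ b <;>
    simp [ha, hb, show ¬ a < 0 ↔ 0 ≤ a from not_lt, show ¬ b < 0 ↔ 0 ≤ b from not_lt] <;> omega

lemma imag_idec (s : Bool) (m : Nat) : imag (idec s m) = m := by
  cases s <;> simp [imag, idec] <;> omega

lemma neg_idec (s : Bool) (m : Nat) : decide (idec s m < 0) = s := by
  cases s <;> simp [idec] <;> omega

lemma bxor_assoc (a b c : Int) :
    PySem.Int.bxor (PySem.Int.bxor a b) c = PySem.Int.bxor a (PySem.Int.bxor b c) := by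
  rw [bxor_eq_idec a b, bxor_eq_idec b c, bxor_eq_idec (idec _ _) c, bxor_eq_idec a (idec _ _),
    neg_idec, neg_idec, imag_idec, imag_idec, Nat.xor_assoc, Bool.xor_assoc]

lemma bxor_zero_left (a : Int) : PySem.Int.bxor 0 a = a := by
  rw [PySem.Int.bxor_comm]; exact PySem.Int.bxor_zero a

lemma bxor_cancel_left (a b : Int) : PySem.Int.bxor a (PySem.Int.bxor a b) = b := by
  rw [← bxor_assoc, PySem.Int.bxor_self, bxor_zero_left]

lemma bxor_eq_zero_iff (a b : Int) : PySem.Int.bxor a b = 0 ↔ a = b := by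
  constructor
  · intro h
    have := congrArg (PySem.Int.bxor a) h
    rwa [bxor_cancel_left, PySem.Int.bxor_zero, eq_comm] at this
  · rintro rfl; exact PySem.Int.bxor_self a

-- ---------- the word semantics: Wle ms k x = "x is an xor of at most k masks" ----------
def xorFold (l : List Int) : Int := l.foldr PySem.Int.bxor 0

def Wle (ms : List Int) (k : Nat) (x : Int) : Prop :=
  ∃ l : List Int, l.length ≤ k ∧ (∀ m ∈ l, m ∈ ms) ∧ xorFold l = x

lemma xorFold_append (l1 l2 : List Int) :
    xorFold (l1 ++ l2) = PySem.Int.bxor (xorFold l1) (xorFold l2) := by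
  induction l1 with
  | nil => simp [xorFold, bxor_zero_left]
  | cons a l ih => simp [xorFold, List.foldr] at ih ⊢; rw [ih, bxor_assoc]

lemma Wle_zero (ms : List Int) (x : Int) : Wle ms 0 x ↔ x = 0 := by
  constructor
  · rintro ⟨l, hl, -, hf⟩
    have : l = [] := List.length_eq_zero_iff.mp (Nat.le_zero.mp hl)
    subst this; simpa [xorFold] using hf.symm
  · rintro rfl; exact ⟨[], by simp, by simp, rfl⟩

lemma Wle_mono (ms : List Int) {a b : Nat} (h : a ≤ b) {x : Int} : Wle ms a x → Wle ms b x := by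
  rintro ⟨l, hl, hm, hf⟩; exact ⟨l, le_trans hl h, hm, hf⟩

lemma Wle_succ_iff (ms : List Int) (k : Nat) (x : Int) :
    Wle ms (k + 1) x ↔ Wle ms k x ∨ ∃ y, Wle ms k y ∧ ∃ m ∈ ms, x = PySem.Int.bxor y m := by
  constructor
  · rintro ⟨l, hl, hm, hf⟩
    cases l with
    | nil => exact Or.inl ⟨[], by simp, by simp, hf⟩
    | cons m l' =>
      refine Or.inr ⟨xorFold l', ⟨l', by simpa using hl, fun a ha => hm a (List.mem_cons_of_mem _ ha), rfl⟩,
        m, hm m (List.mem_cons_self ..), ?_⟩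
      rw [← hf]
      show xorFold ([m] ++ l') = _
      rw [xorFold_append, PySem.Int.bxor_comm]
      simp [xorFold, PySem.Int.bxor_zero]
  · rintro (h | ⟨y, ⟨l, hl, hm, hf⟩, m, hmem, rfl⟩)
    · exact Wle_mono ms (Nat.le_succ k) h
    · refine ⟨l ++ [m], by simp; omega, ?_, ?_⟩
      · intro a ha
        rcases List.mem_append.mp ha with h | h
        · exact hm a h
        · have ham : a = m := by simpa using h
          rw [ham]; exact hmem
      · rw [xorFold_append, hf]
        simp [xorFold, PySem.Int.bxor_zero]

lemma Wle_add_xor (ms : List Int) {a b : Nat} {x z : Int} :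
    Wle ms a x → Wle ms b z → Wle ms (a + b) (PySem.Int.bxor x z) := by
  rintro ⟨l1, h1, hm1, hf1⟩ ⟨l2, h2, hm2, hf2⟩
  refine ⟨l1 ++ l2, by simp; omega, ?_, by rw [xorFold_append, hf1, hf2]⟩
  intro m hm
  rcases List.mem_append.mp hm with h | h
  exacts [hm1 m h, hm2 m h]

lemma Wle_split (ms : List Int) {c : Nat} {t : Int} (h : Wle ms c t) (a b : Nat) (hab : c ≤ a + b) :
    ∃ y, Wle ms a y ∧ Wle ms b (PySem.Int.bxor y t) := by
  obtain ⟨l, hl, hm, hf⟩ := h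
  refine ⟨xorFold (l.take a), ⟨l.take a, by simp, fun m hm' => hm m (List.mem_of_mem_take hm'), rfl⟩,
    l.drop a, ?_, fun m hm' => hm m (List.mem_of_mem_drop hm'), ?_⟩
  · have := l.length_drop (i := a); omega
  · have hl2 : xorFold l = PySem.Int.bxor (xorFold (l.take a)) (xorFold (l.drop a)) := by
      conv_lhs => rw [← List.take_append_drop a l]
      rw [xorFold_append]
    rw [← hf, hl2, bxor_cancel_left]

lemma Wle_stab (ms : List Int) {d : Nat} (h : ∀ x, Wle ms (d + 1) x → Wle ms d x) :
    ∀ k x, Wle ms k x → Wle ms d x := by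
  have step : ∀ j x, Wle ms (d + j) x → Wle ms d x := by
    intro j
    induction j with
    | zero => intro x hx; exact hx
    | succ j ih =>
      intro x hx
      rcases (Wle_succ_iff ms (d + j) x).mp hx with h1 | ⟨y, hy, m, hmem, rfl⟩
      · exact ih x h1
      · exact h _ ((Wle_succ_iff ms d _).mpr (Or.inr ⟨y, ih y hy, m, hmem, rfl⟩))
  intro k x hx
  rcases le_or_gt k d with hk | hk
  · exact Wle_mono ms hk hx
  · exact step (k - d) x (by rwa [Nat.add_sub_cancel' (le_of_lt hk)])

lemma xorFold_range {ms : List Int} {n : Nat} (hm : ∀ m ∈ ms, 0 ≤ m ∧ m.toNat < 2 ^ n) :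
    ∀ l : List Int, (∀ m ∈ l, m ∈ ms) → 0 ≤ xorFold l ∧ (xorFold l).toNat < 2 ^ n := by
  intro l
  induction l with
  | nil => intro _; exact ⟨le_refl 0, by simpa [xorFold] using Nat.two_pow_pos n⟩
  | cons a l ih =>
    intro hmem
    obtain ⟨ha0, halt⟩ := hm a (hmem a (List.mem_cons_self ..))
    obtain ⟨hr0, hrlt⟩ := ih (fun m h => hmem m (List.mem_cons_of_mem _ h))
    have : xorFold (a :: l) = ((a.toNat ^^^ (xorFold l).toNat : Nat) : Int) := by
      show PySem.Int.bxor a (xorFold l) = _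
      exact PySem.Int.bxor_of_nonneg ha0 hr0
    rw [this]
    refine ⟨Int.natCast_nonneg _, ?_⟩
    simpa using Nat.xor_lt_two_pow halt hrlt

lemma Wle_range {ms : List Int} {n : Nat} (hm : ∀ m ∈ ms, 0 ≤ m ∧ m.toNat < 2 ^ n) :
    ∀ {k x}, Wle ms k x → 0 ≤ x ∧ x.toNat < 2 ^ n := by
  rintro k x ⟨l, -, hmem, hf⟩
  rw [← hf]
  exact xorFold_range hm l hmem

-- the answer characterization shared by both programs
def AnsIs (ms : List Int) (t : Int) (r : Option Int) : Prop :=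
  (r = none ∧ ∀ k, ¬ Wle ms k t) ∨
  ∃ k : Nat, r = some (k : Int) ∧ Wle ms k t ∧ ∀ j < k, ¬ Wle ms j t

lemma AnsIs_unique {ms : List Int} {t : Int} {r r' : Option Int}
    (h : AnsIs ms t r) (h' : AnsIs ms t r') : r = r' := by
  rcases h with ⟨hr, hn⟩ | ⟨k, hr, hk, hmin⟩
  · rcases h' with ⟨hr', -⟩ | ⟨k', -, hk', -⟩
    · rw [hr, hr']
    · exact absurd hk' (hn k')
  · rcases h' with ⟨-, hn'⟩ | ⟨k', hr', hk', hmin'⟩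
    · exact absurd hk (hn' k)
    · have : k = k' := by
        rcases lt_trichotomy k k' with h | h | h
        · exact absurd hk (hmin' k h)
        · exact h
        · exact absurd hk' (hmin k' h)
      rw [hr, hr', this]


-- ---------- A-side: the forward BFS computes AnsIs ----------
def memD (n : Nat) (dist : List Int) (x : Int) : Prop :=
  0 ≤ x ∧ x.toNat < 2 ^ n ∧ dist.getD x.toNat (-1) ≠ -1

-- invariant of A's loop: queue = rem ++ nxt, rem at BFS level d, nxt at level d+1
def AInv (ms : List Int) (n : Nat) (t : Int) (d : Nat) (dist rem nxt : List Int) : Prop :=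
  dist.length = 2 ^ n ∧
  (∀ x, memD n dist x ↔ (Wle ms d x ∨ x ∈ nxt)) ∧
  (∀ x ∈ rem, dist.getD x.toNat (-1) = (d : Int) ∧ Wle ms d x) ∧
  (∀ x ∈ nxt, dist.getD x.toNat (-1) = (d : Int) + 1 ∧ Wle ms (d + 1) x ∧ ¬ Wle ms d x) ∧
  (∀ x, Wle ms (d + 1) x → Wle ms d x ∨ x ∈ nxt ∨ ∃ s ∈ rem, ∃ m ∈ ms, x = PySem.Int.bxor s m) ∧
  ¬ Wle ms d t ∧ t ∉ nxt

lemma AInv_roll {ms : List Int} {n : Nat} {t : Int} {d : Nat} {dist nxt : List Int}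
    (h : AInv ms n t d dist [] nxt) : AInv ms n t (d + 1) dist nxt [] := by
  obtain ⟨h1, h2, -, h4, h5, h6, h7⟩ := h
  refine ⟨h1, ?_, ?_, by simp, ?_, ?_, by simp⟩
  · intro x
    rw [h2 x]
    constructor
    · rintro (h | h)
      · exact Or.inl (Wle_mono ms (Nat.le_succ d) h)
      · exact Or.inl (h4 x h).2.1
    · rintro (h | h)
      · rcases h5 x h with h' | h' | ⟨s, hs, -⟩
        · exact Or.inl h'
        · exact Or.inr h'
        · exact absurd hs (List.not_mem_nil)
      · exact absurd h (List.not_mem_nil)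
  · intro x hx
    exact ⟨(h4 x hx).1, (h4 x hx).2.1⟩
  · intro x hx
    rcases (Wle_succ_iff ms (d + 1) x).mp hx with h | ⟨y, hy, m, hm, rfl⟩
    · exact Or.inl h
    · rcases h5 y hy with h' | h' | ⟨s, hs, -⟩
      · exact Or.inl ((Wle_succ_iff ms d _).mpr (Or.inr ⟨y, h', m, hm, rfl⟩))
      · exact Or.inr (Or.inr ⟨y, h', m, hm, rfl⟩)
      · exact absurd hs (List.not_mem_nil)
  · intro hx
    rcases h5 t hx with h' | h' | ⟨s, hs, -⟩
    · exact h6 h'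
    · exact h7 h'
    · exact absurd hs (List.not_mem_nil)

lemma AInv_exhaust {ms : List Int} {n : Nat} {t : Int} {d : Nat} {dist : List Int}
    (h : AInv ms n t d dist [] []) : ∀ k, ¬ Wle ms k t := by
  obtain ⟨-, -, -, -, h5, h6, -⟩ := h
  intro k hk
  refine h6 (Wle_stab ms ?_ k t hk)
  intro x hx
  rcases h5 x hx with h' | h' | ⟨s, hs, -⟩
  · exact h'
  · exact absurd h' (List.not_mem_nil)
  · exact absurd hs (List.not_mem_nil)

-- one pass of A's inner loop, against the level semantics
lemma AInner_sem {ms : List Int} {n : Nat} {t : Int}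
    (hm : ∀ m ∈ ms, 0 ≤ m ∧ m.toNat < 2 ^ n)
    {d : Nat} {st : Int} (hst : Wle ms d st) (hT : ¬ Wle ms d t) :
    ∀ (bms : List Int), (∀ m ∈ bms, m ∈ ms) →
    ∀ (dist acc extraPre : List Int),
    dist.length = 2 ^ n →
    (∀ x, memD n dist x ↔ (Wle ms d x ∨ x ∈ extraPre ++ acc)) →
    (∀ x ∈ extraPre ++ acc, dist.getD x.toNat (-1) = (d : Int) + 1 ∧ Wle ms (d + 1) x ∧ ¬ Wle ms d x) →
    t ∉ extraPre ++ acc →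
    (match bfsAInner t (d : Int) st bms dist acc with
     | (_, _, some r) => r = (d : Int) + 1 ∧ Wle ms (d + 1) t
     | (dist', acc', none) =>
       (∃ new, acc' = acc ++ new ∧ dist'.count (-1) + new.length = dist.count (-1)) ∧
       dist'.length = 2 ^ n ∧
       (∀ x, memD n dist' x ↔ (Wle ms d x ∨ x ∈ extraPre ++ acc')) ∧
       (∀ x ∈ extraPre ++ acc', dist'.getD x.toNat (-1) = (d : Int) + 1 ∧ Wle ms (d + 1) x ∧ ¬ Wle ms d x) ∧
       t ∉ extraPre ++ acc' ∧
       (∀ m ∈ bms, memD n dist' (PySem.Int.bxor st m)) ∧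
       (∀ i : Nat, dist.getD i (-1) ≠ -1 → dist'.getD i (-1) = dist.getD i (-1))) := by
  intro bms
  induction bms with
  | nil =>
    intro _ dist acc extraPre hlen hiff hval hT'
    simp only [bfsAInner]
    refine ⟨⟨[], by simp, by simp⟩, hlen, hiff, hval, hT', ?_, ?_⟩
    · intro m hmem
      simp at hmem
    · intro i _
      trivial
  | cons bm bms ih =>
    intro hbms dist acc extraPre hlen hiff hval hT'
    obtain ⟨hbm0, hbmlt⟩ := hm bm (hbms bm (List.mem_cons_self ..))
    obtain ⟨hst0, hstlt⟩ := Wle_range hm hst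
    have hbmsTl : ∀ m ∈ bms, m ∈ ms := fun m h => hbms m (List.mem_cons_of_mem _ h)
    have hns : PySem.Int.bxor st bm = ((st.toNat ^^^ bm.toNat : Nat) : Int) :=
      PySem.Int.bxor_of_nonneg hst0 hbm0
    set k : Nat := st.toNat ^^^ bm.toNat with hkdef
    have hklt : k < 2 ^ n := Nat.xor_lt_two_pow hstlt hbmlt
    have hkd : k < dist.length := by omega
    have hWns : Wle ms (d + 1) ((k : Nat) : Int) := by
      rw [← hns]
      exact (Wle_succ_iff ms d _).mpr (Or.inr ⟨st, hst, bm, hbms bm (List.mem_cons_self ..), rfl⟩)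
    by_cases hv : dist[k] = (-1 : Int)
    · -- entry -1: k is undiscovered
      have hvq : dist[k]? = some (-1) := by rw [List.getElem?_eq_getElem hkd, hv]
      have hgetk : dist.getD k (-1) = -1 := by rw [List.getD_eq_getElem dist (-1) hkd, hv]
      have hund : ¬ (Wle ms d ((k : Nat) : Int) ∨ ((k : Nat) : Int) ∈ extraPre ++ acc) := by
        intro hmem
        have : memD n dist ((k : Nat) : Int) := (hiff _).mpr hmem
        exact this.2.2 (by simpa using hgetk)
      by_cases ht : ((k : Nat) : Int) = t
      · -- early return
        subst ht
        have : bfsAInner ((k:Nat):Int) (d : Int) st (bm :: bms) dist acc =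
            (PySem.List.pySetD dist ((k:Nat):Int) ((d:Int) + 1), acc, some ((d : Int) + 1)) := by
          simp [bfsAInner, hns, hvq]
        rw [this]
        exact ⟨rfl, hWns⟩
      · -- insert k and continue
        have hkval : (dist.set k ((d:Int) + 1)).getD k (-1) = (d:Int) + 1 := by
          simp [List.getD, List.getElem?_set_self hkd]
        have hsetgd : ∀ i : Nat, i ≠ k → (dist.set k ((d:Int) + 1)).getD i (-1) = dist.getD i (-1) := by
          intro i hik
          simp [List.getD, List.getElem?_set_ne (fun h => hik h.symm)]
        have hstep : bfsAInner t (d : Int) st (bm :: bms) dist acc =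
            bfsAInner t (d : Int) st bms (dist.set k ((d:Int) + 1)) (acc ++ [((k:Nat):Int)]) := by
          simp [bfsAInner, hns, hvq, ht]
        have hiff2 : ∀ x, memD n (dist.set k ((d:Int) + 1)) x ↔
            (Wle ms d x ∨ x ∈ extraPre ++ (acc ++ [((k:Nat):Int)])) := by
          intro x
          by_cases hx : x = ((k:Nat):Int)
          · subst hx
            constructor
            · intro _; exact Or.inr (by simp)
            · intro _
              exact ⟨Int.natCast_nonneg k, by simpa using hklt, by rw [Int.toNat_natCast, hkval]; omega⟩
          · have hxk : x.toNat ≠ k ∨ ¬ 0 ≤ x ∨ ¬ x.toNat < 2 ^ n := by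
              by_cases h0 : 0 ≤ x
              · by_cases hlt : x.toNat < 2 ^ n
                · refine Or.inl (fun hc => hx ?_); omega
                · exact Or.inr (Or.inr hlt)
              · exact Or.inr (Or.inl h0)
            rcases hxk with hxk | hxk | hxk
            · have h' := hiff x
              unfold memD at h' ⊢
              rw [hsetgd _ hxk, h']
              constructor
              · rintro (h | h)
                · exact Or.inl h
                · exact Or.inr (by simp at h ⊢; tauto)
              · rintro (h | h)
                · exact Or.inl h
                · simp at h
                  rcases h with h | h | h
                  · exact Or.inr (by simp; tauto)
                  · exact Or.inr (by simp; tauto)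
                  · exact absurd (by rw [h]) hx
            all_goals
              constructor
              · intro hmemx; exact absurd hmemx.1 (by unfold memD at *; tauto)
              · intro hmemx
                exfalso
                rcases hmemx with h | h
                · obtain ⟨h0, hlt⟩ := Wle_range hm h; tauto
                · rcases List.mem_append.mp h with h | h
                  · obtain ⟨h0', hlt', -⟩ := (hiff x).mpr (Or.inr (List.mem_append.mpr (Or.inl h)))
                    tauto
                  · rcases List.mem_append.mp h with h | h
                    · obtain ⟨h0', hlt', -⟩ := (hiff x).mpr (Or.inr (List.mem_append.mpr (Or.inr h)))
                      tauto
                    · exact hx (by simpa using h)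
        have hval2 : ∀ x ∈ extraPre ++ (acc ++ [((k:Nat):Int)]),
            (dist.set k ((d:Int) + 1)).getD x.toNat (-1) = (d:Int) + 1 ∧ Wle ms (d+1) x ∧ ¬ Wle ms d x := by
          intro x hx
          by_cases hxk : x = ((k:Nat):Int)
          · subst hxk
            refine ⟨by rw [Int.toNat_natCast, hkval], hWns, fun hc => hund (Or.inl hc)⟩
          · have hxold : x ∈ extraPre ++ acc := by
              simp at hx ⊢; rcases hx with h | h | h
              · tauto
              · tauto
              · exact absurd (by rw [h]) hxk
            obtain ⟨hv1, hv2, hv3⟩ := hval x hxold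
            have : x.toNat ≠ k := by
              intro hc
              rw [hc] at hv1; rw [hgetk] at hv1; omega
            exact ⟨by rw [hsetgd _ this]; exact hv1, hv2, hv3⟩
        have hT2 : t ∉ extraPre ++ (acc ++ [((k:Nat):Int)]) := by
          simp at hT' ⊢
          refine ⟨hT'.1, hT'.2, fun h => ht (by rw [h])⟩
        have key := ih hbmsTl (dist.set k ((d:Int) + 1)) (acc ++ [((k:Nat):Int)]) extraPre
          (by simpa using hlen) hiff2 hval2 hT2
        rw [hstep]
        rcases hres : bfsAInner t (d : Int) st bms (dist.set k ((d:Int) + 1)) (acc ++ [((k:Nat):Int)])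
          with ⟨dist'', acc'', r⟩
        rw [hres] at key
        cases r with
        | some r => exact key
        | none =>
          obtain ⟨⟨new', hacc'', hcnt⟩, klen, kiff, kval, kT, kcov, kpres⟩ := key
          have hcntset : (dist.set k ((d:Int) + 1)).count (-1) + 1 = dist.count (-1) := by
            have h1 : 1 ≤ dist.count (-1) := List.one_le_count_iff.mpr (hv ▸ List.getElem_mem hkd)
            have h2 := List.count_set (a := (d:Int) + 1) (b := (-1 : Int)) (l := dist) (i := k) hkd
            have hne : (((d:Int) + 1 : Int) == -1) = false := by simp; omega
            rw [hv, hne] at h2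
            simp at h2
            omega
          refine ⟨⟨((k:Nat):Int) :: new', by simpa using hacc'', by simp only [List.length_cons]; omega⟩,
            klen, kiff, kval, kT, ?_, ?_⟩
          · intro m hmem
            rcases List.mem_cons.mp hmem with rfl | hmem'
            · rw [hns]
              refine ⟨Int.natCast_nonneg k, by simpa using hklt, ?_⟩
              rw [Int.toNat_natCast]
              rw [kpres k (by rw [hkval]; omega)]
              rw [hkval]; omega
            · exact kcov m hmem'
          · intro i hi
            have hik : i ≠ k := fun h => hi (h ▸ hgetk)
            rw [kpres i (by rw [hsetgd _ hik]; exact hi), hsetgd _ hik]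
    · -- already discovered: skip
      have hvq : dist[k]? = some dist[k] := List.getElem?_eq_getElem hkd
      have hstep : bfsAInner t (d : Int) st (bm :: bms) dist acc =
          bfsAInner t (d : Int) st bms dist acc := by
        simp [bfsAInner, hns, hvq, hv]
      rw [hstep]
      have key := ih hbmsTl dist acc extraPre hlen hiff hval hT'
      rcases hres : bfsAInner t (d : Int) st bms dist acc with ⟨dist'', acc'', r⟩
      rw [hres] at key
      cases r with
      | some r => exact key
      | none =>
        obtain ⟨hnew, klen, kiff, kval, kT, kcov, kpres⟩ := key
        refine ⟨hnew, klen, kiff, kval, kT, ?_, kpres⟩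
        intro m hmem
        rcases List.mem_cons.mp hmem with rfl | hmem'
        · rw [hns]
          refine ⟨Int.natCast_nonneg k, by simpa using hklt, ?_⟩
          rw [Int.toNat_natCast]
          have hgk : dist.getD k (-1) ≠ -1 := by
            rw [List.getD_eq_getElem dist (-1) hkd]; exact hv
          rw [kpres k hgk]
          exact hgk
        · exact kcov m hmem'



-- one dequeue step of A's while-loop (ih = the induction hypothesis at the smaller fuel)
lemma ALoop_step {ms : List Int} {n : Nat} {t : Int}
    (hm : ∀ m ∈ ms, 0 ≤ m ∧ m.toNat < 2 ^ n) (fuel : Nat)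
    (ih : ∀ (dist rem nxt : List Int) (d : Nat), AInv ms n t d dist rem nxt →
      dist.count (-1) + rem.length + nxt.length + 1 ≤ fuel →
      AnsIs ms t (bfsALoop t ms fuel dist (rem ++ nxt))) :
    ∀ (dist : List Int) (st : Int) (rem₂ nxt : List Int) (d : Nat),
    AInv ms n t d dist (st :: rem₂) nxt →
    dist.count (-1) + (st :: rem₂).length + nxt.length + 1 ≤ fuel + 1 →
    AnsIs ms t (bfsALoop t ms (fuel + 1) dist ((st :: rem₂) ++ nxt)) := by
  intro dist st rem₂ nxt d hInv hfuel
  obtain ⟨h1, h2, h3, h4, h5, h6, h7⟩ := hInv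
  obtain ⟨hstv, hstW⟩ := h3 st (List.mem_cons_self ..)
  obtain ⟨hst0, hstlt⟩ := Wle_range hm hstW
  have hread : (PySem.List.pyGet? dist st).getD (-1) = (d : Int) := by
    rw [PySem.List.pyGet?_of_nonneg dist hst0,
      List.getElem?_eq_getElem (by omega : st.toNat < dist.length)]
    simpa [← List.getD_eq_getElem dist (-1) (by omega : st.toNat < dist.length)] using hstv
  have hunf : bfsALoop t ms (fuel + 1) dist ((st :: rem₂) ++ nxt) =
      (match bfsAInner t (d : Int) st ms dist [] with
       | (_, _, some r) => some r
       | (dist', acc, none) => bfsALoop t ms fuel dist' ((rem₂ ++ nxt) ++ acc)) := by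
    rw [List.cons_append]
    simp only [bfsALoop, hread]
  rw [hunf]
  have key := AInner_sem hm hstW h6 ms (fun m h => h) dist [] nxt h1
    (by simpa using h2) (by simpa using h4) (by simpa using h7)
  rcases hres : bfsAInner t (d : Int) st ms dist [] with ⟨dist', acc', r⟩
  rw [hres] at key
  cases r with
  | some r =>
    obtain ⟨hr, hWt⟩ := key
    subst hr
    refine Or.inr ⟨d + 1, by push_cast; ring_nf, hWt, ?_⟩
    intro j hj hWj
    exact h6 (Wle_mono ms (by omega) hWj)
  | none =>
    obtain ⟨⟨new, hacc', hcnt⟩, klen, kiff, kval, kT, kcov, kpres⟩ := key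
    rw [List.nil_append] at hacc'
    subst hacc'
    have hInv' : AInv ms n t d dist' rem₂ (nxt ++ acc') := by
      refine ⟨klen, by simpa using kiff, ?_, by simpa using kval, ?_, h6, by simpa using kT⟩
      · intro x hx
        obtain ⟨hxv, hxW⟩ := h3 x (List.mem_cons_of_mem _ hx)
        exact ⟨by rw [kpres x.toNat (by rw [hxv]; omega)]; exact hxv, hxW⟩
      · intro x hx
        rcases h5 x hx with h' | h' | ⟨s, hs, m', hm', hxeq⟩
        · exact Or.inl h'
        · exact Or.inr (Or.inl (List.mem_append.mpr (Or.inl h')))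
        · rcases List.mem_cons.mp hs with rfl | hs'
          · subst hxeq
            have hiff' := kiff (PySem.Int.bxor s m')
            rcases hiff'.mp (kcov m' hm') with h'' | h''
            · exact Or.inl h''
            · exact Or.inr (Or.inl h'')
          · exact Or.inr (Or.inr ⟨s, hs', m', hm', hxeq⟩)
    have hq : (rem₂ ++ nxt) ++ acc' = rem₂ ++ (nxt ++ acc') := by simp
    show AnsIs ms t (bfsALoop t ms fuel dist' ((rem₂ ++ nxt) ++ acc'))
    rw [hq]
    rcases rem₂ with _ | ⟨st₂, rem₃⟩
    · -- level exhausted: roll to level d+1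
      have hInv'' := AInv_roll hInv'
      have := ih dist' (nxt ++ acc') [] (d + 1) hInv''
        (by simp at hfuel hcnt ⊢; omega)
      simpa using this
    · exact ih dist' (st₂ :: rem₃) (nxt ++ acc') d hInv'
        (by simp at hfuel hcnt ⊢; omega)

lemma ALoop_main {ms : List Int} {n : Nat} {t : Int}
    (hm : ∀ m ∈ ms, 0 ≤ m ∧ m.toNat < 2 ^ n) :
    ∀ (fuel : Nat) (dist rem nxt : List Int) (d : Nat),
    AInv ms n t d dist rem nxt →
    dist.count (-1) + rem.length + nxt.length + 1 ≤ fuel →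
    AnsIs ms t (bfsALoop t ms fuel dist (rem ++ nxt)) := by
  intro fuel
  induction fuel with
  | zero => intro dist rem nxt d _ hfuel; omega
  | succ fuel ih =>
    intro dist rem nxt d hInv hfuel
    rcases rem with _ | ⟨st, rem₂⟩
    · rcases nxt with _ | ⟨st, nxt₂⟩
      · simp only [List.nil_append, bfsALoop]
        exact Or.inl ⟨rfl, AInv_exhaust hInv⟩
      · have hInv' := AInv_roll hInv
        have := ALoop_step hm fuel ih dist st nxt₂ [] (d + 1) hInv'
          (by simp at hfuel ⊢; omega)
        simpa using this
    · exact ALoop_step hm fuel ih dist st rem₂ nxt d hInv hfuel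


lemma A_correct {t : Int} {ms : List Int} {n_lights : Int}
    (hm : ∀ m ∈ ms, 0 ≤ m ∧ m < ((2 ^ n_lights.toNat : Nat) : Int)) (ht : t ≠ 0) :
    AnsIs ms t (solve_by_bfs t ms n_lights) := by
  set n := n_lights.toNat with hn'
  have hmOK : ∀ m ∈ ms, 0 ≤ m ∧ m.toNat < 2 ^ n := by
    intro m hmem
    obtain ⟨h0, hlt⟩ := hm m hmem
    exact ⟨h0, by omega⟩
  have hpos : 0 < 2 ^ n := Nat.two_pow_pos n
  set dist0 : List Int := (List.replicate (2 ^ n) (-1 : Int)).set 0 0 with hd0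
  have hlen0 : dist0.length = 2 ^ n := by simp [hd0]
  have hget00 : dist0.getD 0 (-1) = 0 := by
    rw [hd0]; simp [List.getD]
  have hgetI : ∀ i : Nat, i ≠ 0 → dist0.getD i (-1) = -1 := by
    intro i hi
    by_cases hilt : i < 2 ^ n
    · rw [hd0]
      have hgl : i < ((List.replicate (2 ^ n) (-1 : Int)).set 0 0).length := by simpa using hilt
      rw [List.getD_eq_getElem _ _ hgl, List.getElem_set_ne (by omega)]
      simp
    · exact List.getD_eq_default _ _ (by rw [hlen0]; omega)
  have hInv0 : AInv ms n t 0 dist0 [0] [] := by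
    refine ⟨hlen0, ?_, ?_, by simp, ?_, ?_, by simp⟩
    · intro x
      constructor
      · rintro ⟨hx0, hxlt, hxv⟩
        have : x.toNat = 0 := by
          by_contra hc
          exact hxv (hgetI x.toNat hc)
        have : x = 0 := by omega
        subst this
        exact Or.inl ((Wle_zero ms 0).mpr rfl)
      · rintro (hx | hx)
        · have : x = 0 := (Wle_zero ms x).mp hx
          subst this
          refine ⟨le_refl 0, by simpa using hpos, ?_⟩
          simp only [Int.toNat_zero]
          rw [hget00]
          omega
        · exact absurd hx (List.not_mem_nil)
    · intro x hx
      have : x = 0 := by simpa using hx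
      subst this
      exact ⟨by simpa using hget00, (Wle_zero ms 0).mpr rfl⟩
    · intro x hx
      rcases (Wle_succ_iff ms 0 x).mp hx with h | ⟨y, hy, m, hmem, rfl⟩
      · exact Or.inl h
      · have : y = 0 := (Wle_zero ms y).mp hy
        subst this
        exact Or.inr (Or.inr ⟨0, by simp, m, hmem, rfl⟩)
    · intro hc
      exact ht ((Wle_zero ms t).mp hc)
  have hcnt0 : dist0.count (-1) + 1 = 2 ^ n := by
    have hr : (List.replicate (2 ^ n) (-1 : Int)).count (-1) = 2 ^ n := by simp
    have h2 := List.count_set (a := (0 : Int)) (b := (-1 : Int))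
      (l := List.replicate (2 ^ n) (-1 : Int)) (i := 0) (by simpa using hpos)
    simp only [List.getElem_replicate] at h2
    rw [hr] at h2
    simp at h2
    rw [hd0, h2]
    omega
  have key := ALoop_main hmOK (2 ^ n + 2) dist0 [0] [] 0 hInv0 (by simp; omega)
  have hL : solve_by_bfs t ms n_lights = bfsALoop t ms (2 ^ n + 2) dist0 [0] := by
    simp only [solve_by_bfs, ht, if_false, hd0, hn']
  rw [hL]
  simpa using key


-- ---------- B-side: shifted level families (forward shift 0, backward shift target) ----------
lemma bxor_right_cancel (a b : Int) : PySem.Int.bxor (PySem.Int.bxor a b) b = a := by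
  rw [bxor_assoc, PySem.Int.bxor_self, PySem.Int.bxor_zero]

lemma bxor_swap (a b c : Int) :
    PySem.Int.bxor (PySem.Int.bxor a b) c = PySem.Int.bxor (PySem.Int.bxor a c) b := by
  rw [bxor_assoc, bxor_assoc, PySem.Int.bxor_comm b c]

def WCp (ms : List Int) (c : Int) (k : Nat) (x : Int) : Prop := Wle ms k (PySem.Int.bxor x c)

lemma WCp_zero (ms : List Int) (k : Nat) (x : Int) : WCp ms 0 k x ↔ Wle ms k x := by
  unfold WCp
  rw [PySem.Int.bxor_zero]

lemma WCp_mono (ms : List Int) {c : Int} {a b : Nat} (h : a ≤ b) {x : Int} :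
    WCp ms c a x → WCp ms c b x := Wle_mono ms h

lemma WCp_succ_iff (ms : List Int) (c : Int) (k : Nat) (x : Int) :
    WCp ms c (k + 1) x ↔ WCp ms c k x ∨ ∃ y, WCp ms c k y ∧ ∃ m ∈ ms, x = PySem.Int.bxor y m := by
  unfold WCp
  rw [Wle_succ_iff]
  constructor
  · rintro (h | ⟨z, hz, m, hmem, hzeq⟩)
    · exact Or.inl h
    · refine Or.inr ⟨PySem.Int.bxor z c, by rwa [bxor_right_cancel], m, hmem, ?_⟩
      have : x = PySem.Int.bxor (PySem.Int.bxor x c) c := (bxor_right_cancel x c).symm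
      rw [this, hzeq, bxor_swap]
  · rintro (h | ⟨y, hy, m, hmem, rfl⟩)
    · exact Or.inl h
    · exact Or.inr ⟨PySem.Int.bxor y c, hy, m, hmem, by rw [bxor_swap]⟩

lemma WCp_stab (ms : List Int) (c : Int) {d : Nat}
    (h : ∀ x, WCp ms c (d + 1) x → WCp ms c d x) :
    ∀ k x, WCp ms c k x → WCp ms c d x := by
  have step : ∀ j x, WCp ms c (d + j) x → WCp ms c d x := by
    intro j
    induction j with
    | zero => intro x hx; exact hx
    | succ j ih =>
      intro x hx
      rcases (WCp_succ_iff ms c (d + j) x).mp hx with h1 | ⟨y, hy, m, hmem, rfl⟩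
      · exact ih x h1
      · exact h _ ((WCp_succ_iff ms c d _).mpr (Or.inr ⟨y, ih y hy, m, hmem, rfl⟩))
  intro k x hx
  rcases le_or_gt k d with hk | hk
  · exact WCp_mono ms hk hx
  · exact step (k - d) x (by rwa [Nat.add_sub_cancel' (le_of_lt hk)])

-- membership of the two distance dictionaries
def memK (dict : PySem.Dict Int Int) (x : Int) : Prop := (dict.get? x).isSome = true

def DInv (ms : List Int) (c : Int) (d : Nat) (dict : PySem.Dict Int Int) : Prop :=
  (∀ x, memK dict x ↔ WCp ms c d x) ∧
  (∀ x j, dict.get? x = some j → ∃ k : Nat, k ≤ d ∧ j = (k : Int) ∧ WCp ms c k x) ∧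
  dict.keys.Nodup

def FrontInv (ms : List Int) (c : Int) (d : Nat) (front : List Int) : Prop :=
  (∀ x ∈ front, WCp ms c d x) ∧
  (∀ x, WCp ms c (d + 1) x → WCp ms c d x ∨ ∃ s ∈ front, ∃ m ∈ ms, x = PySem.Int.bxor s m)

def DisjK (dF dB : PySem.Dict Int Int) : Prop := ∀ x, memK dF x → memK dB x → False

-- inner loop of B's _expand (one frontier node s, over the mask list)
lemma BInner_sem {ms : List Int} {cS cO : Int} {d dO : Nat}
    {other : PySem.Dict Int Int}
    (hother : ∀ x j, other.get? x = some j → ∃ k : Nat, k ≤ dO ∧ j = (k : Int) ∧ WCp ms cO k x)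
    {s : Int} (hs : WCp ms cS d s) :
    ∀ (bms : List Int), (∀ m ∈ bms, m ∈ ms) →
    ∀ (self : PySem.Dict Int Int) (acc : List Int),
    (∀ x, memK self x ↔ (WCp ms cS d x ∨ x ∈ acc)) →
    (∀ x j, self.get? x = some j → ∃ k : Nat, k ≤ d + 1 ∧ j = (k : Int) ∧ WCp ms cS k x) →
    self.keys.Nodup →
    (∀ x, memK self x → memK other x → False) →
    (∀ x ∈ acc, ¬ WCp ms cS d x) →
    (match bidiInner other (d : Int) s bms self acc with
     | (_, _, some j) => ∃ ns, ∃ k : Nat, k ≤ dO ∧ j = (k : Int) ∧ WCp ms cS (d + 1) ns ∧ WCp ms cO k ns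
     | (self', acc', none) =>
       (∃ fresh, acc' = acc ++ fresh ∧ self'.size = self.size + fresh.length) ∧
       (∀ x, memK self' x ↔ (WCp ms cS d x ∨ x ∈ acc')) ∧
       (∀ x j, self'.get? x = some j → ∃ k : Nat, k ≤ d + 1 ∧ j = (k : Int) ∧ WCp ms cS k x) ∧
       self'.keys.Nodup ∧
       (∀ x, memK self' x → memK other x → False) ∧
       (∀ x ∈ acc', ¬ WCp ms cS d x) ∧
       (∀ m ∈ bms, memK self' (PySem.Int.bxor s m)) ∧
       (∀ x, memK self x → memK self' x)) := by
  intro bms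
  induction bms with
  | nil =>
    intro _ self acc hiff hsound hnd hdisj haccneg
    simp only [bidiInner]
    exact ⟨⟨[], by simp, by simp⟩, hiff, hsound, hnd, hdisj, haccneg,
      fun m hmem => absurd hmem (List.not_mem_nil), fun x h => h⟩
  | cons bm bms ih =>
    intro hbms self acc hiff hsound hnd hdisj haccneg
    have hbmsTl : ∀ m ∈ bms, m ∈ ms := fun m h => hbms m (List.mem_cons_of_mem _ h)
    set ns := PySem.Int.bxor s bm with hnsdef
    have hWns : WCp ms cS (d + 1) ns :=
      (WCp_succ_iff ms cS d ns).mpr (Or.inr ⟨s, hs, bm, hbms bm (List.mem_cons_self ..), rfl⟩)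
    rcases hself : self.get? ns with _ | j
    · rcases hoth : other.get? ns with _ | j
      · -- fresh: insert and continue
        have hstep : bidiInner other (d : Int) s (bm :: bms) self acc =
            bidiInner other (d : Int) s bms (self.insert ns ((d : Int) + 1)) (acc ++ [ns]) := by
          simp only [bidiInner, ← hnsdef, hself, hoth]
        have hnmem : ¬ (WCp ms cS d ns ∨ ns ∈ acc) := by
          rw [← hiff ns]
          unfold memK
          rw [hself]
          simp
        have hiff2 : ∀ x, memK (self.insert ns ((d : Int) + 1)) x ↔
            (WCp ms cS d x ∨ x ∈ acc ++ [ns]) := by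
          intro x
          unfold memK
          rw [PySem.Dict.get?_insert]
          by_cases hx : x = ns
          · subst hx; simp
          · rw [if_neg hx]
            rw [show ((self.get? x).isSome = true) ↔ _ from hiff x]
            simp [hx]
        have hsound2 : ∀ x j, (self.insert ns ((d : Int) + 1)).get? x = some j →
            ∃ k : Nat, k ≤ d + 1 ∧ j = (k : Int) ∧ WCp ms cS k x := by
          intro x j hj
          rw [PySem.Dict.get?_insert] at hj
          by_cases hx : x = ns
          · rw [if_pos hx] at hj
            refine ⟨d + 1, le_refl _, by injection hj with h; omega, hx ▸ hWns⟩
          · rw [if_neg hx] at hj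
            exact hsound x j hj
        have hdisj2 : ∀ x, memK (self.insert ns ((d : Int) + 1)) x → memK other x → False := by
          intro x hx ho
          unfold memK at hx
          rw [PySem.Dict.get?_insert] at hx
          by_cases hxns : x = ns
          · subst hxns
            unfold memK at ho
            rw [hoth] at ho
            simp at ho
          · rw [if_neg hxns] at hx
            exact hdisj x hx ho
        have haccneg2 : ∀ x ∈ acc ++ [ns], ¬ WCp ms cS d x := by
          intro x hx
          rcases List.mem_append.mp hx with h | h
          · exact haccneg x h
          · have : x = ns := by simpa using h
            subst this
            exact fun hc => hnmem (Or.inl hc)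
        have key := ih hbmsTl (self.insert ns ((d : Int) + 1)) (acc ++ [ns])
          hiff2 hsound2 (PySem.Dict.nodup_keys_insert _ _ _ hnd) hdisj2 haccneg2
        rw [hstep]
        rcases hres : bidiInner other (d : Int) s bms (self.insert ns ((d : Int) + 1)) (acc ++ [ns])
          with ⟨self'', acc'', r⟩
        rw [hres] at key
        cases r with
        | some j => exact key
        | none =>
          obtain ⟨⟨fresh, hacc'', hsz⟩, kiff, ksound, knd, kdisj, kaccneg, kcov, kmono⟩ := key
          have hszstep : (self.insert ns ((d : Int) + 1)).size = self.size + 1 := by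
            rw [PySem.Dict.size_insert]
            rw [if_neg]
            rw [PySem.Dict.contains_eq_isSome_get?, hself]
            simp
          refine ⟨⟨ns :: fresh, by simpa using hacc'', by rw [hsz, hszstep]; simp; omega⟩,
            kiff, ksound, knd, kdisj, kaccneg, ?_, ?_⟩
          · intro m hmem
            rcases List.mem_cons.mp hmem with rfl | hmem'
            · exact kmono ns (by unfold memK; rw [PySem.Dict.get?_insert_self]; rfl)
            · exact kcov m hmem'
          · intro x hx
            refine kmono x ?_
            unfold memK at hx ⊢
            rw [PySem.Dict.get?_insert]
            by_cases hxns : x = ns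
            · subst hxns; rw [hself] at hx; simp at hx
            · rw [if_neg hxns]; exact hx
      · -- meet the other ball
        have hstep : bidiInner other (d : Int) s (bm :: bms) self acc = (self, acc, some j) := by
          simp only [bidiInner, ← hnsdef, hself, hoth]
        rw [hstep]
        obtain ⟨k, hk, hjk, hWk⟩ := hother ns j hoth
        exact ⟨ns, k, hk, hjk, hWns, hWk⟩
    · -- already in self: skip
      have hstep : bidiInner other (d : Int) s (bm :: bms) self acc =
          bidiInner other (d : Int) s bms self acc := by
        simp only [bidiInner, ← hnsdef, hself]
      rw [hstep]
      have key := ih hbmsTl self acc hiff hsound hnd hdisj haccneg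
      rcases hres : bidiInner other (d : Int) s bms self acc with ⟨self'', acc'', r⟩
      rw [hres] at key
      cases r with
      | some j' => exact key
      | none =>
        obtain ⟨hfr, kiff, ksound, knd, kdisj, kaccneg, kcov, kmono⟩ := key
        refine ⟨hfr, kiff, ksound, knd, kdisj, kaccneg, ?_, kmono⟩
        intro m hmem
        rcases List.mem_cons.mp hmem with rfl | hmem'
        · exact kmono ns (by unfold memK; rw [hself]; rfl)
        · exact kcov m hmem'


-- outer loop of B's _expand (over the whole frontier)
lemma BExpand_sem {ms : List Int} {cS cO : Int} {d dO : Nat}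
    {other : PySem.Dict Int Int}
    (hother : ∀ x j, other.get? x = some j → ∃ k : Nat, k ≤ dO ∧ j = (k : Int) ∧ WCp ms cO k x) :
    ∀ (front : List Int), (∀ s ∈ front, WCp ms cS d s) →
    ∀ (self : PySem.Dict Int Int) (acc : List Int),
    (∀ x, memK self x ↔ (WCp ms cS d x ∨ x ∈ acc)) →
    (∀ x j, self.get? x = some j → ∃ k : Nat, k ≤ d + 1 ∧ j = (k : Int) ∧ WCp ms cS k x) →
    self.keys.Nodup →
    (∀ x, memK self x → memK other x → False) →
    (∀ x ∈ acc, ¬ WCp ms cS d x) →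
    (match bidiExpand other (d : Int) ms front self acc with
     | (_, _, some j) => ∃ ns, ∃ k : Nat, k ≤ dO ∧ j = (k : Int) ∧ WCp ms cS (d + 1) ns ∧ WCp ms cO k ns
     | (self', acc', none) =>
       (∃ fresh, acc' = acc ++ fresh ∧ self'.size = self.size + fresh.length) ∧
       (∀ x, memK self' x ↔ (WCp ms cS d x ∨ x ∈ acc')) ∧
       (∀ x j, self'.get? x = some j → ∃ k : Nat, k ≤ d + 1 ∧ j = (k : Int) ∧ WCp ms cS k x) ∧
       self'.keys.Nodup ∧
       (∀ x, memK self' x → memK other x → False) ∧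
       (∀ x ∈ acc', ¬ WCp ms cS d x) ∧
       (∀ s ∈ front, ∀ m ∈ ms, memK self' (PySem.Int.bxor s m)) ∧
       (∀ x, memK self x → memK self' x)) := by
  intro front
  induction front with
  | nil =>
    intro _ self acc hiff hsound hnd hdisj haccneg
    simp only [bidiExpand]
    exact ⟨⟨[], by simp, by simp⟩, hiff, hsound, hnd, hdisj, haccneg,
      fun s hs => absurd hs (List.not_mem_nil), fun x h => h⟩
  | cons s ss ih =>
    intro hfr self acc hiff hsound hnd hdisj haccneg
    have hs : WCp ms cS d s := hfr s (List.mem_cons_self ..)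
    have hssTl : ∀ x ∈ ss, WCp ms cS d x := fun x h => hfr x (List.mem_cons_of_mem _ h)
    have key := BInner_sem hother hs ms (fun m h => h) self acc hiff hsound hnd hdisj haccneg
    rcases hres : bidiInner other (d : Int) s ms self acc with ⟨self₁, acc₁, r⟩
    rw [hres] at key
    have hstep : bidiExpand other (d : Int) ms (s :: ss) self acc =
        (match (self₁, acc₁, r) with
         | (self', acc', some j) => (self', acc', some j)
         | (self', acc', none) => bidiExpand other (d : Int) ms ss self' acc') := by
      simp only [bidiExpand, hres]
    cases r with
    | some j =>
      rw [hstep]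
      exact key
    | none =>
      obtain ⟨⟨fresh, hacc₁, hsz₁⟩, kiff, ksound, knd, kdisj, kaccneg, kcov, kmono⟩ := key
      have key₂ := ih hssTl self₁ acc₁ kiff ksound knd kdisj kaccneg
      rw [hstep]
      show (match bidiExpand other (d : Int) ms ss self₁ acc₁ with
       | (_, _, some j) => ∃ ns, ∃ k : Nat, k ≤ dO ∧ j = (k : Int) ∧ WCp ms cS (d + 1) ns ∧ WCp ms cO k ns
       | (self', acc', none) => _)
      rcases hres₂ : bidiExpand other (d : Int) ms ss self₁ acc₁ with ⟨self₂, acc₂, r₂⟩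
      rw [hres₂] at key₂
      cases r₂ with
      | some j => exact key₂
      | none =>
        obtain ⟨⟨fresh₂, hacc₂, hsz₂⟩, k2iff, k2sound, k2nd, k2disj, k2accneg, k2cov, k2mono⟩ := key₂
        refine ⟨⟨fresh ++ fresh₂, by rw [hacc₂, hacc₁]; simp, by rw [hsz₂, hsz₁]; simp; omega⟩,
          k2iff, k2sound, k2nd, k2disj, k2accneg, ?_, fun x h => k2mono x (kmono x h)⟩
        intro s' hs' m hmem
        rcases List.mem_cons.mp hs' with rfl | hs''
        · exact k2mono _ (kcov m hmem)
        · exact k2cov s' hs'' m hmem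

-- the distance dictionaries cannot outgrow the 2^n reachable states
lemma size_le_pow {ms : List Int} {n : Nat} (hm : ∀ m ∈ ms, 0 ≤ m ∧ m.toNat < 2 ^ n)
    {c : Int} {d : Nat} {dict : PySem.Dict Int Int}
    (hiff : ∀ x, memK dict x ↔ WCp ms c d x) (hnd : dict.keys.Nodup) :
    dict.size ≤ 2 ^ n := by
  have hkeys : ∀ x ∈ dict.keys, 0 ≤ PySem.Int.bxor x c ∧ (PySem.Int.bxor x c).toNat < 2 ^ n := by
    intro x hx
    have hsome : memK dict x := by
      unfold memK
      rcases hq : dict.get? x with _ | v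
      · exact absurd hx ((PySem.Dict.get?_eq_none_iff_not_mem_keys dict x).mp hq)
      · rfl
    exact Wle_range hm ((hiff x).mp hsome)
  set L : List Nat := dict.keys.map (fun x => (PySem.Int.bxor x c).toNat) with hL
  have hndL : L.Nodup := by
    rw [hL]
    refine List.Nodup.map_on ?_ hnd
    intro x hx y hy hxy
    obtain ⟨hx0, -⟩ := hkeys x hx
    obtain ⟨hy0, -⟩ := hkeys y hy
    have : PySem.Int.bxor x c = PySem.Int.bxor y c := by omega
    have h2 := congrArg (fun z => PySem.Int.bxor z c) this
    simpa [bxor_right_cancel] using h2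
  have hsub : L.toFinset ⊆ Finset.range (2 ^ n) := by
    intro v hv
    rw [List.mem_toFinset, hL] at hv
    obtain ⟨x, hx, rfl⟩ := List.mem_map.mp hv
    exact Finset.mem_range.mpr (hkeys x hx).2
  have hcard := Finset.card_le_card hsub
  rw [List.toFinset_card_of_nodup hndL, Finset.card_range] at hcard
  have hlenL : L.length = dict.keys.length := by rw [hL]; simp
  have hkeysz : dict.keys.length = dict.size := by
    simp [PySem.Dict.keys, PySem.Dict.size]
  omega

-- an exhausted frontier means the whole component is recorded: the searches cannot meet
lemma B_none_frontF {ms : List Int} {t : Int} {dF dB : Nat} {distF distB : PySem.Dict Int Int}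
    (hiffF : ∀ x, memK distF x ↔ WCp ms 0 dF x) (hiffB : ∀ x, memK distB x ↔ WCp ms t dB x)
    (hdisj : DisjK distF distB) (hfr : FrontInv ms 0 dF []) : ∀ k, ¬ Wle ms k t := by
  intro k hk
  have hstab : ∀ x, WCp ms 0 (dF + 1) x → WCp ms 0 dF x := by
    intro x hx
    rcases hfr.2 x hx with h | ⟨s, hs, -⟩
    · exact h
    · exact absurd hs (List.not_mem_nil)
  have hWt : WCp ms 0 dF t := WCp_stab ms 0 hstab k t ((WCp_zero ms k t).mpr hk)
  have hBt : WCp ms t dB t := by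
    unfold WCp
    rw [PySem.Int.bxor_self]
    exact Wle_mono ms (Nat.zero_le dB) ((Wle_zero ms 0).mpr rfl)
  exact hdisj t ((hiffF t).mpr hWt) ((hiffB t).mpr hBt)

lemma B_none_frontB {ms : List Int} {t : Int} {dF dB : Nat} {distF distB : PySem.Dict Int Int}
    (hiffF : ∀ x, memK distF x ↔ WCp ms 0 dF x) (hiffB : ∀ x, memK distB x ↔ WCp ms t dB x)
    (hdisj : DisjK distF distB) (hfr : FrontInv ms t dB []) : ∀ k, ¬ Wle ms k t := by
  intro k hk
  have hstab : ∀ x, WCp ms t (dB + 1) x → WCp ms t dB x := by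
    intro x hx
    rcases hfr.2 x hx with h | ⟨s, hs, -⟩
    · exact h
    · exact absurd hs (List.not_mem_nil)
  have h0t : WCp ms t k 0 := by
    unfold WCp
    rwa [bxor_zero_left]
  have hB0 : WCp ms t dB 0 := WCp_stab ms t hstab k 0 h0t
  have hF0 : WCp ms 0 dF 0 := by
    rw [WCp_zero]
    exact Wle_mono ms (Nat.zero_le dF) ((Wle_zero ms 0).mpr rfl)
  exact hdisj 0 ((hiffF 0).mpr hF0) ((hiffB 0).mpr hB0)

-- no meeting recorded yet bounds the true distance from below
lemma meet_no_small {ms : List Int} {t : Int} {dF dB : Nat} {distF distB : PySem.Dict Int Int}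
    (hiffF : ∀ x, memK distF x ↔ WCp ms 0 dF x) (hiffB : ∀ x, memK distB x ↔ WCp ms t dB x)
    (hdisj : DisjK distF distB) : ∀ i ≤ dF + dB, ¬ Wle ms i t := by
  intro i hi hw
  obtain ⟨y, hyF, hyB⟩ := Wle_split ms hw dF dB hi
  exact hdisj y ((hiffF y).mpr ((WCp_zero ms dF y).mpr hyF)) ((hiffB y).mpr hyB)


lemma BLoop_sem {ms : List Int} {n : Nat} {t : Int}
    (hm : ∀ m ∈ ms, 0 ≤ m ∧ m.toNat < 2 ^ n) :
    ∀ (fuel : Nat) (distF distB : PySem.Dict Int Int) (frontF frontB : List Int) (dF dB : Nat),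
    DInv ms 0 dF distF → DInv ms t dB distB →
    FrontInv ms 0 dF frontF → FrontInv ms t dB frontB →
    DisjK distF distB →
    2 * 2 ^ n + 2 ≤ distF.size + distB.size + fuel →
    AnsIs ms t (bidiLoop ms fuel distF distB frontF frontB (dF : Int) (dB : Int)) := by
  intro fuel
  induction fuel with
  | zero =>
    intro distF distB frontF frontB dF dB hFI hBI _ _ _ hfuel
    have h1 := size_le_pow hm hFI.1 hFI.2.2
    have h2 := size_le_pow hm hBI.1 hBI.2.2
    omega
  | succ fuel ih =>
    intro distF distB frontF frontB dF dB hFI hBI hFr hBr hdisj hfuel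
    obtain ⟨hFiff, hFsound, hFnd⟩ := hFI
    obtain ⟨hBiff, hBsound, hBnd⟩ := hBI
    have hszF := size_le_pow hm hFiff hFnd
    have hszB := size_le_pow hm hBiff hBnd
    simp only [bidiLoop]
    by_cases hFB : frontF = [] ∨ frontB = []
    · rw [if_pos hFB]
      rcases hFB with h | h
      · subst h
        exact Or.inl ⟨rfl, B_none_frontF hFiff hBiff hdisj hFr⟩
      · subst h
        exact Or.inl ⟨rfl, B_none_frontB hFiff hBiff hdisj hBr⟩
    · rw [if_neg hFB]
      by_cases hlen : frontF.length ≤ frontB.length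
      · -- expand the forward ball
        rw [if_pos hlen]
        have key := BExpand_sem hBsound frontF hFr.1 distF []
          (by intro x; rw [hFiff x]; simp)
          (fun x j hj => by obtain ⟨k, hk, h1, h2⟩ := hFsound x j hj; exact ⟨k, by omega, h1, h2⟩)
          hFnd hdisj (by simp)
        rcases hres : bidiExpand distB (dF : Int) ms frontF distF [] with ⟨distF', newF, r⟩
        rw [hres] at key
        cases r with
        | some j =>
          obtain ⟨ns, k, hk, rfl, hWns, hWk⟩ := key
          have hWt : Wle ms (dF + 1 + k) t := by
            have h1 : Wle ms (dF + 1) ns := (WCp_zero ms (dF + 1) ns).mp hWns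
            have h2 := Wle_add_xor ms h1 hWk
            rwa [bxor_cancel_left] at h2
          refine Or.inr ⟨dF + 1 + k, by push_cast; ring_nf, hWt, ?_⟩
          intro i hi hWi
          exact meet_no_small hFiff hBiff hdisj i (by omega) hWi
        | none =>
          obtain ⟨⟨fresh, hacc, hsz⟩, kiff, ksound, knd, kdisj, kaccneg, kcov, kmono⟩ := key
          rw [List.nil_append] at hacc
          subst hacc
          have hiffF' : ∀ x, memK distF' x ↔ WCp ms 0 (dF + 1) x := by
            intro x
            constructor
            · intro hx
              obtain ⟨j, hj⟩ := Option.isSome_iff_exists.mp hx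
              obtain ⟨k, hk, -, hW⟩ := ksound x j hj
              exact WCp_mono ms hk hW
            · intro hx
              rcases hFr.2 x hx with h | ⟨s, hs, m, hmem, rfl⟩
              · exact kmono x ((hFiff x).mpr h)
              · exact kcov s hs m hmem
          have hFI' : DInv ms 0 (dF + 1) distF' := ⟨hiffF', ksound, knd⟩
          have hFr' : FrontInv ms 0 (dF + 1) newF := by
            constructor
            · intro x hx
              exact (hiffF' x).mp ((kiff x).mpr (Or.inr hx))
            · intro x hx
              rcases (WCp_succ_iff ms 0 (dF + 1) x).mp hx with h | ⟨y, hy, m, hmem, rfl⟩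
              · exact Or.inl h
              · rcases (kiff y).mp ((hiffF' y).mpr hy) with h' | h'
                · exact Or.inl ((WCp_succ_iff ms 0 dF _).mpr (Or.inr ⟨y, h', m, hmem, rfl⟩))
                · exact Or.inr ⟨y, h', m, hmem, rfl⟩
          have hcast : (dF : Int) + 1 = ((dF + 1 : Nat) : Int) := by push_cast; ring
          show AnsIs ms t (bidiLoop ms fuel distF' distB newF frontB ((dF : Int) + 1) (dB : Int))
          rw [hcast]
          rcases newF with _ | ⟨x₀, newF₂⟩
          · -- empty new frontier: the next iteration reports unreachable
            rcases fuel with _ | fuel₂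
            · omega
            · simp only [bidiLoop]
              rw [if_pos (Or.inl trivial)]
              exact Or.inl ⟨rfl, B_none_frontF hiffF' hBiff kdisj hFr'⟩
          · exact ih distF' distB (x₀ :: newF₂) frontB (dF + 1) dB hFI' ⟨hBiff, hBsound, hBnd⟩
              hFr' hBr kdisj (by simp at hsz ⊢; omega)
      · -- expand the backward ball
        rw [if_neg hlen]
        have key := BExpand_sem hFsound frontB hBr.1 distB []
          (by intro x; rw [hBiff x]; simp)
          (fun x j hj => by obtain ⟨k, hk, h1, h2⟩ := hBsound x j hj; exact ⟨k, by omega, h1, h2⟩)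
          hBnd (fun x a b => hdisj x b a) (by simp)
        rcases hres : bidiExpand distF (dB : Int) ms frontB distB [] with ⟨distB', newB, r⟩
        rw [hres] at key
        cases r with
        | some j =>
          obtain ⟨ns, k, hk, rfl, hWns, hWk⟩ := key
          have hWt : Wle ms (k + (dB + 1)) t := by
            have h1 : Wle ms k ns := (WCp_zero ms k ns).mp hWk
            have h2 := Wle_add_xor ms h1 hWns
            rwa [bxor_cancel_left] at h2
          refine Or.inr ⟨k + dB + 1, by push_cast; ring_nf, by rwa [show k + dB + 1 = k + (dB + 1) from by omega], ?_⟩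
          intro i hi hWi
          exact meet_no_small hFiff hBiff hdisj i (by omega) hWi
        | none =>
          obtain ⟨⟨fresh, hacc, hsz⟩, kiff, ksound, knd, kdisj, kaccneg, kcov, kmono⟩ := key
          rw [List.nil_append] at hacc
          subst hacc
          have hiffB' : ∀ x, memK distB' x ↔ WCp ms t (dB + 1) x := by
            intro x
            constructor
            · intro hx
              obtain ⟨j, hj⟩ := Option.isSome_iff_exists.mp hx
              obtain ⟨k, hk, -, hW⟩ := ksound x j hj
              exact WCp_mono ms hk hW
            · intro hx
              rcases hBr.2 x hx with h | ⟨s, hs, m, hmem, rfl⟩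
              · exact kmono x ((hBiff x).mpr h)
              · exact kcov s hs m hmem
          have hBI' : DInv ms t (dB + 1) distB' := ⟨hiffB', ksound, knd⟩
          have hBr' : FrontInv ms t (dB + 1) newB := by
            constructor
            · intro x hx
              exact (hiffB' x).mp ((kiff x).mpr (Or.inr hx))
            · intro x hx
              rcases (WCp_succ_iff ms t (dB + 1) x).mp hx with h | ⟨y, hy, m, hmem, rfl⟩
              · exact Or.inl h
              · rcases (kiff y).mp ((hiffB' y).mpr hy) with h' | h'
                · exact Or.inl ((WCp_succ_iff ms t dB _).mpr (Or.inr ⟨y, h', m, hmem, rfl⟩))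
                · exact Or.inr ⟨y, h', m, hmem, rfl⟩
          have hcast : (dB : Int) + 1 = ((dB + 1 : Nat) : Int) := by push_cast; ring
          show AnsIs ms t (bidiLoop ms fuel distF distB' frontF newB (dF : Int) ((dB : Int) + 1))
          rw [hcast]
          rcases newB with _ | ⟨x₀, newB₂⟩
          · rcases fuel with _ | fuel₂
            · omega
            · simp only [bidiLoop]
              rw [if_pos (Or.inr trivial)]
              exact Or.inl ⟨rfl, B_none_frontB hFiff hiffB' (fun x a b => kdisj x b a) hBr'⟩
          · exact ih distF distB' frontF (x₀ :: newB₂) dF (dB + 1) ⟨hFiff, hFsound, hFnd⟩ hBI'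
              hFr hBr' (fun x a b => kdisj x b a) (by simp at hsz ⊢; omega)

lemma B_correct {t : Int} {ms : List Int} {n_lights : Int}
    (hm : ∀ m ∈ ms, 0 ≤ m ∧ m < ((2 ^ n_lights.toNat : Nat) : Int)) (ht : t ≠ 0) :
    AnsIs ms t (solve_by_bfs_alt t ms n_lights) := by
  set n := n_lights.toNat with hn'
  have hmOK : ∀ m ∈ ms, 0 ≤ m ∧ m.toNat < 2 ^ n := by
    intro m hmem
    obtain ⟨h0, hlt⟩ := hm m hmem
    exact ⟨h0, by omega⟩
  have hL : solve_by_bfs_alt t ms n_lights = bidiLoop ms (2 * 2 ^ n + 4)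
      (PySem.Dict.empty.insert 0 0) (PySem.Dict.empty.insert t 0) [0] [t] ((0 : Nat) : Int) ((0 : Nat) : Int) := by
    simp only [solve_by_bfs_alt, ht, if_false, hn']
    norm_num
  rw [hL]
  have hgetF : ∀ x : Int, (PySem.Dict.empty.insert (0:Int) (0:Int)).get? x = if x = 0 then some 0 else none := by
    intro x
    rw [PySem.Dict.get?_insert]
    by_cases hx : x = 0 <;> simp [hx, PySem.Dict.get?_empty]
  have hgetB : ∀ x : Int, (PySem.Dict.empty.insert t (0:Int)).get? x = if x = t then some 0 else none := by
    intro x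
    rw [PySem.Dict.get?_insert]
    by_cases hx : x = t <;> simp [hx, PySem.Dict.get?_empty]
  have hWF0 : ∀ x : Int, WCp ms 0 0 x ↔ x = 0 := by
    intro x
    rw [WCp_zero, Wle_zero]
  have hWB0 : ∀ x : Int, WCp ms t 0 x ↔ x = t := by
    intro x
    unfold WCp
    rw [Wle_zero]
    exact bxor_eq_zero_iff x t
  refine BLoop_sem hmOK (2 * 2 ^ n + 4) _ _ [0] [t] 0 0 ⟨?_, ?_, ?_⟩ ⟨?_, ?_, ?_⟩ ⟨?_, ?_⟩ ⟨?_, ?_⟩ ?_ ?_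
  · intro x
    unfold memK
    rw [hgetF x, hWF0 x]
    by_cases hx : x = 0 <;> simp [hx]
  · intro x j hj
    rw [hgetF x] at hj
    by_cases hx : x = 0
    · subst hx
      simp at hj
      exact ⟨0, le_refl 0, by omega, (hWF0 0).mpr rfl⟩
    · rw [if_neg hx] at hj; cases hj
  · exact PySem.Dict.nodup_keys_insert _ _ _ PySem.Dict.nodup_keys_empty
  · intro x
    unfold memK
    rw [hgetB x, hWB0 x]
    by_cases hx : x = t <;> simp [hx]
  · intro x j hj
    rw [hgetB x] at hj
    by_cases hx : x = t
    · rw [if_pos hx] at hj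
      injection hj with hj'
      exact ⟨0, le_refl 0, by omega, (hWB0 x).mpr hx⟩
    · rw [if_neg hx] at hj; cases hj
  · exact PySem.Dict.nodup_keys_insert _ _ _ PySem.Dict.nodup_keys_empty
  · intro x hx
    have : x = 0 := by simpa using hx
    subst this
    exact (hWF0 0).mpr rfl
  · intro x hx
    rcases (WCp_succ_iff ms 0 0 x).mp hx with h | ⟨y, hy, m, hmem, rfl⟩
    · exact Or.inl h
    · have : y = 0 := (hWF0 y).mp hy
      subst this
      exact Or.inr ⟨0, by simp, m, hmem, rfl⟩
  · intro x hx
    have hxt : x = t := by simpa using hx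
    exact (hWB0 x).mpr hxt
  · intro x hx
    rcases (WCp_succ_iff ms t 0 x).mp hx with h | ⟨y, hy, m, hmem, rfl⟩
    · exact Or.inl h
    · have hyt : y = t := (hWB0 y).mp hy
      exact Or.inr ⟨y, by simp [hyt], m, hmem, rfl⟩
  · intro x hxF hxB
    unfold memK at hxF hxB
    rw [hgetF x] at hxF
    rw [hgetB x] at hxB
    by_cases hx : x = 0
    · subst hx
      rw [if_neg (fun h => ht h.symm)] at hxB
      simp at hxB
    · rw [if_neg hx] at hxF
      simp at hxF
  · have s1 : (PySem.Dict.empty.insert (0:Int) (0:Int)).size = 1 := by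
      rw [PySem.Dict.size_insert]
      simp [PySem.Dict.contains_eq_isSome_get?, PySem.Dict.get?_empty, PySem.Dict.size_empty]
    have s2 : (PySem.Dict.empty.insert t (0:Int)).size = 1 := by
      rw [PySem.Dict.size_insert]
      simp [PySem.Dict.contains_eq_isSome_get?, PySem.Dict.get?_empty, PySem.Dict.size_empty]
    omega

-- ===== VERDICT (by name: the statement is the Claim_ definition above) =====
theorem solve_by_bfs_spec : Claim_equal_solve_by_bfs := by
  intro target masks n_lights _ hpre
  unfold Spec_solve_by_bfs
  by_cases ht : target = 0
  · simp [solve_by_bfs, solve_by_bfs_alt, ht]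
  · obtain ⟨-, hmask⟩ := hpre.resolve_left ht
    exact AnsIs_unique (A_correct hmask ht) (B_correct hmask ht)
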